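-- pv_equiv track=rewrite | github.com/pvestal/tower-echo-brain | src/services/business_logic_matcher.py | _pattern_matches_query
-- ===== SOURCE A (Python) =====
-- from typing import Dict, List, Optional, Tuple
--
-- def _pattern_matches_query(pattern: Dict, query_lower: str) -> bool:
--     """Check if a pattern is relevant to the query"""
--     fact_type = pattern.get('fact_type', '')
--     learned_fact = pattern.get('learned_fact', '').lower()
--     metadata = pattern.get('metadata', {})
--
--     # Technical stack preferences
--     if fact_type == 'technical_stack_preferences':
--         tech_keywords = ['database', 'db', 'mysql', 'postgresql', 'postgres', 'frontend', 'vue', 'react', 'backend', 'python', 'node']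
--         if any(keyword in query_lower for keyword in tech_keywords):
--             return True
--
--     # Quality standards
--     if fact_type == 'quality_standards':
--         quality_keywords = ['working', 'fixed', 'done', 'complete', 'ready', 'test', 'verify']
--         if any(keyword in query_lower for keyword in quality_keywords):
--             return True
--
--     # Communication patterns
--     if fact_type == 'communication_patterns':
--         frustration_keywords = ['fucking', 'broken', 'lying', 'bullshit', 'wrong']
--         if any(keyword in query_lower for keyword in frustration_keywords):
--             return True
--
--     # Project priorities
--     if fact_type == 'project_priorities':
--         project_keywords = ['anime', 'production', 'echo', 'brain', 'tower', 'service']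
--         if any(keyword in query_lower for keyword in project_keywords):
--             return True
--
--     # Naming standards
--     if fact_type == 'naming_standards':
--         naming_keywords = ['name', 'file', 'enhanced', 'improved', 'unified', 'complete']
--         if any(keyword in query_lower for keyword in naming_keywords):
--             return True
--
--     return False
-- ===== SOURCE B (Python) =====
-- # Inverted index: one flat (keyword, fact_type) table, scanned once per query.
-- _FLAT_KEYWORDS = [
--     ('database', 'technical_stack_preferences'), ('db', 'technical_stack_preferences'),
--     ('mysql', 'technical_stack_preferences'), ('postgresql', 'technical_stack_preferences'),
--     ('postgres', 'technical_stack_preferences'), ('frontend', 'technical_stack_preferences'),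
--     ('vue', 'technical_stack_preferences'), ('react', 'technical_stack_preferences'),
--     ('backend', 'technical_stack_preferences'), ('python', 'technical_stack_preferences'),
--     ('node', 'technical_stack_preferences'),
--     ('working', 'quality_standards'), ('fixed', 'quality_standards'), ('done', 'quality_standards'),
--     ('complete', 'quality_standards'), ('ready', 'quality_standards'), ('test', 'quality_standards'),
--     ('verify', 'quality_standards'),
--     ('fucking', 'communication_patterns'), ('broken', 'communication_patterns'),
--     ('lying', 'communication_patterns'), ('bullshit', 'communication_patterns'),
--     ('wrong', 'communication_patterns'),
--     ('anime', 'project_priorities'), ('production', 'project_priorities'),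
--     ('echo', 'project_priorities'), ('brain', 'project_priorities'),
--     ('tower', 'project_priorities'), ('service', 'project_priorities'),
--     ('name', 'naming_standards'), ('file', 'naming_standards'), ('enhanced', 'naming_standards'),
--     ('improved', 'naming_standards'), ('unified', 'naming_standards'), ('complete', 'naming_standards'),
-- ]
--
-- def _pattern_matches_query(pattern, query_lower):
--     """Relevance via an inverted keyword index: collect the fact_types whose
--     keyword occurs in the query, then test membership."""
--     fact_type = pattern.get('fact_type', '')
--     learned_fact = pattern.get('learned_fact', '').lower()
--     metadata = pattern.get('metadata', {})
--     relevant_types = {ft for kw, ft in _FLAT_KEYWORDS if kw in query_lower}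
--     return fact_type in relevant_types
-- ===== Notes on version B (the rewrite author's own statement) =====
-- stated objective: alternative
-- what changed: Replaces A's per-fact_type dispatch-then-scan with an inverted flat (keyword, fact_type) index: one pass over all keywords builds the set of fact_types matched by the query, then a single set-membership test answers the question.
import Mathlib
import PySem

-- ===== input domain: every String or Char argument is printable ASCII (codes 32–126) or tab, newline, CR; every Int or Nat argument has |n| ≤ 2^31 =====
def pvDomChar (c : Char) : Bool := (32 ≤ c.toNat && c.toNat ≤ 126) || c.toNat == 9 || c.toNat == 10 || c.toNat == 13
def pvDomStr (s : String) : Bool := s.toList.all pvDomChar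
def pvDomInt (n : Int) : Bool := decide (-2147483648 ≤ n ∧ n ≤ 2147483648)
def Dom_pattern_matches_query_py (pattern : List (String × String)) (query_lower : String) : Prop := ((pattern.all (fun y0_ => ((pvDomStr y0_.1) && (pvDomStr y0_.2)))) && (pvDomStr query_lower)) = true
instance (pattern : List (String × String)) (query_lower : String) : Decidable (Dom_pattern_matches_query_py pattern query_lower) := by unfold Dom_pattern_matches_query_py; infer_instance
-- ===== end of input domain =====

-- B replaces A's per-fact_type dispatch-then-scan by an inverted flat (keyword, fact_type) index:
-- one scan over all keywords collects the set of matched fact_types, then one membership test (objective: alternative).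

-- ===== PORT A =====
def pattern_matches_query_py (pattern : List (String × String)) (query_lower : String) : Bool :=
  let fact_type := PySem.Dict.getD (PySem.Dict.mk pattern) "fact_type" ""
  let _learned_fact := PySem.Str.lower (PySem.Dict.getD (PySem.Dict.mk pattern) "learned_fact" "")
  -- metadata = pattern.get('metadata', {}): the dict's values are strings, the unused default is ""
  let _metadata := PySem.Dict.getD (PySem.Dict.mk pattern) "metadata" ""
  if fact_type == "technical_stack_preferences" &&
      (["database", "db", "mysql", "postgresql", "postgres", "frontend", "vue", "react", "backend", "python", "node"].any
        (fun keyword => PySem.Str.isIn keyword query_lower)) then true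
  else if fact_type == "quality_standards" &&
      (["working", "fixed", "done", "complete", "ready", "test", "verify"].any
        (fun keyword => PySem.Str.isIn keyword query_lower)) then true
  else if fact_type == "communication_patterns" &&
      (["fucking", "broken", "lying", "bullshit", "wrong"].any
        (fun keyword => PySem.Str.isIn keyword query_lower)) then true
  else if fact_type == "project_priorities" &&
      (["anime", "production", "echo", "brain", "tower", "service"].any
        (fun keyword => PySem.Str.isIn keyword query_lower)) then true
  else if fact_type == "naming_standards" &&
      (["name", "file", "enhanced", "improved", "unified", "complete"].any
        (fun keyword => PySem.Str.isIn keyword query_lower)) then true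
  else false

-- ===== PORT B =====
def flatKeywords : List (String × String) :=
  [("database", "technical_stack_preferences"), ("db", "technical_stack_preferences"),
   ("mysql", "technical_stack_preferences"), ("postgresql", "technical_stack_preferences"),
   ("postgres", "technical_stack_preferences"), ("frontend", "technical_stack_preferences"),
   ("vue", "technical_stack_preferences"), ("react", "technical_stack_preferences"),
   ("backend", "technical_stack_preferences"), ("python", "technical_stack_preferences"),
   ("node", "technical_stack_preferences"),
   ("working", "quality_standards"), ("fixed", "quality_standards"), ("done", "quality_standards"),
   ("complete", "quality_standards"), ("ready", "quality_standards"), ("test", "quality_standards"),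
   ("verify", "quality_standards"),
   ("fucking", "communication_patterns"), ("broken", "communication_patterns"),
   ("lying", "communication_patterns"), ("bullshit", "communication_patterns"),
   ("wrong", "communication_patterns"),
   ("anime", "project_priorities"), ("production", "project_priorities"),
   ("echo", "project_priorities"), ("brain", "project_priorities"),
   ("tower", "project_priorities"), ("service", "project_priorities"),
   ("name", "naming_standards"), ("file", "naming_standards"), ("enhanced", "naming_standards"),
   ("improved", "naming_standards"), ("unified", "naming_standards"), ("complete", "naming_standards")]

def pattern_matches_query_py_alt (pattern : List (String × String)) (query_lower : String) : Bool :=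
  let fact_type := PySem.Dict.getD (PySem.Dict.mk pattern) "fact_type" ""
  let _learned_fact := PySem.Str.lower (PySem.Dict.getD (PySem.Dict.mk pattern) "learned_fact" "")
  let _metadata := PySem.Dict.getD (PySem.Dict.mk pattern) "metadata" ""
  -- {ft for kw, ft in _FLAT_KEYWORDS if kw in query_lower}
  let relevant_types : PySem.Set String :=
    PySem.Set.ofList ((flatKeywords.filter (fun p => PySem.Str.isIn p.1 query_lower)).map Prod.snd)
  PySem.Set.contains relevant_types fact_type

-- ===== PRECONDITION & SPEC =====
def Spec_pattern_matches_query_py (pattern : List (String × String)) (query_lower : String) (out : Bool) : Prop := out = pattern_matches_query_py_alt pattern query_lower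
instance (pattern : List (String × String)) (query_lower : String) (out : Bool) : Decidable (Spec_pattern_matches_query_py pattern query_lower out) := by unfold Spec_pattern_matches_query_py; infer_instance

-- ===== CLAIM (what is proved, stated in full; the proofs are below) =====
def Claim_equal_pattern_matches_query_py : Prop := ∀ (pattern : List (String × String)) (query_lower : String), Dom_pattern_matches_query_py pattern query_lower → Spec_pattern_matches_query_py pattern query_lower (pattern_matches_query_py pattern query_lower)

-- ===== LEMMAS AND PROOFS =====

-- B's set-membership result, characterised: ft is in the collected set iff some flat pair with that ft has its keyword in the query
theorem contains_relevant (q ft : String) :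
    PySem.Set.contains
      (PySem.Set.ofList ((flatKeywords.filter (fun p => PySem.Str.isIn p.1 q)).map Prod.snd)) ft
      = flatKeywords.any (fun p => PySem.Str.isIn p.1 q && p.2 == ft) := by
  rw [Bool.eq_iff_iff]
  simp [PySem.Set.mem_ofList, List.mem_map, List.mem_filter, List.any_eq_true]

-- ===== VERDICT (by name: the statement is the Claim_ definition above) =====
theorem pattern_matches_query_py_spec : Claim_equal_pattern_matches_query_py := by
  intro pattern query_lower _
  unfold Spec_pattern_matches_query_py pattern_matches_query_py pattern_matches_query_py_alt
  rw [contains_relevant]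
  set ft := PySem.Dict.getD (PySem.Dict.mk pattern) "fact_type" "" with hft
  by_cases h1 : ft = "technical_stack_preferences"
  · simp [h1, flatKeywords]
  · by_cases h2 : ft = "quality_standards"
    · simp [h2, flatKeywords]
    · by_cases h3 : ft = "communication_patterns"
      · simp [h3, flatKeywords]
      · by_cases h4 : ft = "project_priorities"
        · simp [h4, flatKeywords]
        · by_cases h5 : ft = "naming_standards"
          · simp [h5, flatKeywords]
          · have g1 : ("technical_stack_preferences" == ft) = false := beq_eq_false_iff_ne.mpr (fun e => h1 e.symm)
            have g2 : ("quality_standards" == ft) = false := beq_eq_false_iff_ne.mpr (fun e => h2 e.symm)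
            have g3 : ("communication_patterns" == ft) = false := beq_eq_false_iff_ne.mpr (fun e => h3 e.symm)
            have g4 : ("project_priorities" == ft) = false := beq_eq_false_iff_ne.mpr (fun e => h4 e.symm)
            have g5 : ("naming_standards" == ft) = false := beq_eq_false_iff_ne.mpr (fun e => h5 e.symm)
            simp [flatKeywords, h1, h2, h3, h4, h5, g1, g2, g3, g4, g5]
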